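-- pv_equiv track=rewrite | github.com/weertman/starBoard | src/data/csv_io.py | _find_id_key
-- ===== SOURCE A (Python) =====
-- from typing import Dict, List, Iterable, Tuple
--
-- def normalize_key(s: str) -> str:
--     """Normalize CSV header keys: strip whitespace and remove BOM."""
--     if s is None:
--         return ""
--     return s.replace("\ufeff", "").strip()
--
-- ID_SYNONYMS = {
--     "gallery_id": ["gallery_id"],
--     "query_id": ["query_id", "queries_id", "querries_id"],  # tolerate legacy spellings
-- }
--
-- def _find_id_key(row: Dict[str, str], id_col: str) -> str | None:
--     """Find the ID column in a row dict, tolerant to BOM/whitespace/casing and legacy names."""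
--     id_lower = normalize_key(id_col).lower()
--     candidates = {id_lower}
--     candidates.update(normalize_key(s).lower() for s in ID_SYNONYMS.get(id_lower, []))
--     # Exact/synonym match first
--     for k in row.keys():
--         if normalize_key(k).lower() in candidates:
--             return k
--     # Heuristic fallback: any header ending with "_id"
--     for k in row.keys():
--         if normalize_key(k).lower().endswith("_id"):
--             return k
--     return None
-- ===== SOURCE B (Python) =====
-- def normalize_key(s: str) -> str:
--     """Normalize CSV header keys: strip whitespace and remove BOM."""
--     if s is None:
--         return ""
--     return s.replace("\ufeff", "").strip()
--
-- ID_SYNONYMS = {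
--     "gallery_id": ["gallery_id"],
--     "query_id": ["query_id", "queries_id", "querries_id"],
-- }
--
-- def _find_id_key(row, id_col):
--     """Single pass: exact/synonym match returns immediately; first '_id' key is kept as fallback."""
--     id_lower = normalize_key(id_col).lower()
--     candidates = {id_lower}
--     candidates.update(normalize_key(s).lower() for s in ID_SYNONYMS.get(id_lower, []))
--     fallback = None
--     for k in row.keys():
--         norm = normalize_key(k).lower()
--         if norm in candidates:
--             return k
--         if fallback is None and norm.endswith("_id"):
--             fallback = k
--     return fallback
-- ===== Notes on version B (the rewrite author's own statement) =====
-- stated objective: simpler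
-- what changed: The two sequential scans of the keys are fused into one loop that returns immediately on an exact/synonym match and remembers the first '_id'-suffixed key as a fallback, so the keys are traversed (and normalized) only once.
import Mathlib
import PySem

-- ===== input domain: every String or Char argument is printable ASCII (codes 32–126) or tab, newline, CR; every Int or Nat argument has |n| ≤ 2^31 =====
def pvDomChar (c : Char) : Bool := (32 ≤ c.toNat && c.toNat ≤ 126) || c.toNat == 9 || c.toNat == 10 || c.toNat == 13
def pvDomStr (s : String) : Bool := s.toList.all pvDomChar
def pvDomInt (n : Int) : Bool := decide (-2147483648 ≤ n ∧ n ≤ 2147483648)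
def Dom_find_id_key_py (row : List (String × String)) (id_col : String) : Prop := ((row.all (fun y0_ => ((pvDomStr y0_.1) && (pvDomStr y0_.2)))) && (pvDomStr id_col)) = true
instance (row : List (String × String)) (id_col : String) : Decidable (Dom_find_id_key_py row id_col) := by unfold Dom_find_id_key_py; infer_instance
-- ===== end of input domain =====

-- B fuses A's two scans over the keys into one pass (early return on exact/synonym match,
-- first '_id'-suffixed key kept as fallback); objective: simpler, same result.

-- ===== PORT A =====
-- normalize_key (the None branch is unreachable for a str argument)
def normKey (s : String) : String := PySem.Str.strip (PySem.Str.replace s "\ufeff" "")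

def idSynonyms : PySem.Dict String (List String) :=
  PySem.Dict.ofList [("gallery_id", ["gallery_id"]), ("query_id", ["query_id", "queries_id", "querries_id"])]

def find_id_key_py (row : List (String × String)) (id_col : String) : Option String :=
  let id_lower := PySem.Str.lower (normKey id_col)
  let candidates : PySem.Set String :=
    PySem.Set.update (PySem.Set.ofList [id_lower])
      ((PySem.Dict.getD idSynonyms id_lower []).map (fun s => PySem.Str.lower (normKey s)))
  -- first pass: exact/synonym match
  match row.find? (fun kv => PySem.Set.contains candidates (PySem.Str.lower (normKey kv.1))) with
  | some kv => some kv.1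
  | none =>
    -- second pass: any header ending with "_id"
    match row.find? (fun kv => PySem.Str.endswith (PySem.Str.lower (normKey kv.1)) "_id") with
    | some kv => some kv.1
    | none => none

-- ===== PORT B =====
def findIdLoop (candidates : PySem.Set String) : List (String × String) → Option String → Option String
  | [], fallback => fallback
  | kv :: rest, fallback =>
    let norm := PySem.Str.lower (normKey kv.1)
    if PySem.Set.contains candidates norm then some kv.1
    else findIdLoop candidates rest
      (if fallback.isNone && PySem.Str.endswith norm "_id" then some kv.1 else fallback)

def find_id_key_py_alt (row : List (String × String)) (id_col : String) : Option String :=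
  let id_lower := PySem.Str.lower (normKey id_col)
  let candidates : PySem.Set String :=
    PySem.Set.update (PySem.Set.ofList [id_lower])
      ((PySem.Dict.getD idSynonyms id_lower []).map (fun s => PySem.Str.lower (normKey s)))
  findIdLoop candidates row none

-- ===== PRECONDITION & SPEC =====
def Spec_find_id_key_py (row : List (String × String)) (id_col : String) (out : Option String) : Prop := out = find_id_key_py_alt row id_col
instance (row : List (String × String)) (id_col : String) (out : Option String) : Decidable (Spec_find_id_key_py row id_col out) := by unfold Spec_find_id_key_py; infer_instance

-- ===== CLAIM (what is proved, stated in full; the proofs are below) =====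
def Claim_equal_find_id_key_py : Prop := ∀ (row : List (String × String)) (id_col : String), Dom_find_id_key_py row id_col → Spec_find_id_key_py row id_col (find_id_key_py row id_col)

-- ===== LEMMAS AND PROOFS =====
-- Loop invariant: the fused loop equals "first exact match, else pending fallback, else first '_id' key".
theorem findIdLoop_eq (c : PySem.Set String) (row : List (String × String)) (fb : Option String) :
    findIdLoop c row fb =
      match row.find? (fun kv => PySem.Set.contains c (PySem.Str.lower (normKey kv.1))) with
      | some kv => some kv.1
      | none =>
        match fb with
        | some k => some k
        | none => (row.find? (fun kv => PySem.Str.endswith (PySem.Str.lower (normKey kv.1)) "_id")).map Prod.fst := by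
  induction row generalizing fb with
  | nil => cases fb <;> simp [findIdLoop]
  | cons kv rest ih =>
    rw [findIdLoop]
    cases hP : PySem.Set.contains c (PySem.Str.lower (normKey kv.1)) with
    | true =>
      have hP' : PySem.Str.lower (normKey kv.1) ∈ c := by simpa [PySem.Set.contains] using hP
      simp [List.find?, hP']
    | false =>
      rw [if_neg (by simp [PySem.Set.contains, hP]), ih]
      cases fb with
      | some k => simp only [List.find?, hP, Option.isNone_some, Bool.false_and,
          Bool.false_eq_true, if_false]
      | none =>
        cases hE : PySem.Str.endswith (PySem.Str.lower (normKey kv.1)) "_id" with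
        | true => simp only [List.find?, hP, hE, Option.isNone_none, Bool.true_and, if_true, Option.map_some]
        | false => simp only [List.find?, hP, hE, Option.isNone_none, Bool.true_and,
            Bool.false_eq_true, if_false, Option.map]

-- A's two passes, for a fixed candidate set, equal the fused loop started with no fallback.
theorem twoPass_eq (c : PySem.Set String) (row : List (String × String)) :
    (match row.find? (fun kv => PySem.Set.contains c (PySem.Str.lower (normKey kv.1))) with
     | some kv => some kv.1
     | none =>
       match row.find? (fun kv => PySem.Str.endswith (PySem.Str.lower (normKey kv.1)) "_id") with
       | some kv => some kv.1
       | none => none)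
    = findIdLoop c row none := by
  rw [findIdLoop_eq]
  cases row.find? (fun kv => PySem.Set.contains c (PySem.Str.lower (normKey kv.1))) with
  | some kv => rfl
  | none =>
    cases row.find? (fun kv => PySem.Str.endswith (PySem.Str.lower (normKey kv.1)) "_id") <;> rfl

theorem find_id_key_py_spec : Claim_equal_find_id_key_py := by
  intro row id_col _
  show find_id_key_py row id_col = find_id_key_py_alt row id_col
  simp only [find_id_key_py, find_id_key_py_alt]
  exact twoPass_eq _ row
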